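-- pv_equiv track=rewrite | github.com/srhn225/RADiAnce | scripts/data_process/antibody/sabdab.py | _get_model_id_mask
-- ===== SOURCE A (Python) =====
-- def _get_model_id_mask(ids, marks, fr_len): # fr_len is the number residues before and after the CDR to be considered
--      model_mask = [-1 for _ in marks]
--      for i, m in enumerate(marks):
--          if m != '0': model_mask[i] = int(m) # CDR
--          else:
--              if (i + fr_len < len(marks)) and (marks[i + fr_len] != '0'):
--                  model_mask[i] = int(m)
--              elif (i - fr_len >= 0) and (marks[i - fr_len] != '0'):
--                  model_mask[i] = int(m)
--      model_block_id = [_id for i, _id in enumerate(ids) if model_mask[i] >= 0]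
--      model_mark = [m for m in model_mask if m >= 0]
--      return model_block_id, model_mark
-- ===== SOURCE B (Python) =====
-- def _get_model_id_mask(ids, marks, fr_len):
--     n = len(marks)
--     mask = [-1] * n
--     cdr = []
--     for j, m in enumerate(marks):
--         if m != '0':
--             mask[j] = int(m)
--             cdr.append(j)
--     for j in cdr:
--         for i in (j - fr_len, j + fr_len):
--             if 0 <= i < n and marks[i] == '0':
--                 mask[i] = 0
--     model_block_id = [x for x, mk in zip(ids, mask) if mk >= 0]
--     model_mark = [mk for mk in mask if mk >= 0]
--     return model_block_id, model_mark
-- ===== Notes on version B (the rewrite author's own statement) =====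
-- stated objective: alternative
-- what changed: Instead of probing both neighbours at distance fr_len from every position, B records the CDR indices in one pass and then scatters a 0 from each CDR index to the two positions at distance fr_len, finally filtering ids via zip; per-index neighbour probing is replaced by a scatter from the (usually few) CDR positions.
import Mathlib
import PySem

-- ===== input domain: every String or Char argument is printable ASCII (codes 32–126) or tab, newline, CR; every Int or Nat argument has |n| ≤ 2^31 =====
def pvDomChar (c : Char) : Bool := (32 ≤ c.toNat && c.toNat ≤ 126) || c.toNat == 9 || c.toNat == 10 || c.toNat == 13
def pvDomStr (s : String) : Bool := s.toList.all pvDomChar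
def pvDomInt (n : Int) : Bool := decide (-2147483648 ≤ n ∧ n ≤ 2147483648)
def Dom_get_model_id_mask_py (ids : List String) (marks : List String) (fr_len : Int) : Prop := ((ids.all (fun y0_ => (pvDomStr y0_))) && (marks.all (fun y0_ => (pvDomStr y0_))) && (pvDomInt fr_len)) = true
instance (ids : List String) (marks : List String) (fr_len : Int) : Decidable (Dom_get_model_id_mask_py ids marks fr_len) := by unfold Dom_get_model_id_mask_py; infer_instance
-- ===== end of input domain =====

-- B replaces A's per-index probing of both fr_len-neighbours by a scatter from the recorded CDR
-- indices (objective: alternative decomposition, same asymptotic cost). Return values only; no mutation.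

-- ===== PORT A =====
-- the for-loop over enumerate(marks), mutating model_mask[i] in place
-- one iteration of A's loop body (the if/elif chain)
def stepA (marks : List String) (fr_len : Int) (i : Nat) (m : String) (mm : List Int) : List Int :=
  if m ≠ "0" then mm.set i ((PySem.Int.ofStr? m).getD 0)
  else if ((i : Int) + fr_len < (marks.length : Int)) ∧
          PySem.List.pyGetD marks ((i : Int) + fr_len) "" ≠ "0" then
    mm.set i ((PySem.Int.ofStr? m).getD 0)
  else if (0 ≤ (i : Int) - fr_len) ∧
          PySem.List.pyGetD marks ((i : Int) - fr_len) "" ≠ "0" then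
    mm.set i ((PySem.Int.ofStr? m).getD 0)
  else mm

def loopA (marks : List String) (fr_len : Int) : Nat → List String → List Int → List Int
  | _, [], mm => mm
  | i, m :: rest, mm => loopA marks fr_len (i+1) rest (stepA marks fr_len i m mm)

-- the comprehension [ _id for i, _id in enumerate(ids) if model_mask[i] >= 0 ]
def blockA (mask : List Int) : Nat → List String → List String
  | _, [] => []
  | i, x :: rest =>
      if PySem.List.pyGetD mask ((i : Int)) (-1) ≥ 0 then x :: blockA mask (i+1) rest
      else blockA mask (i+1) rest

def get_model_id_mask_py (ids : List String) (marks : List String) (fr_len : Int) : List String × List Int :=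
  let model_mask := loopA marks fr_len 0 marks (marks.map fun _ => (-1 : Int))
  (blockA model_mask 0 ids, model_mask.filter (fun m => decide (m ≥ 0)))

-- ===== PORT B =====
-- first pass: record CDR indices and write their int marks
def loopB (marks : List String) : Nat → List String → List Int → List Nat → List Int × List Nat
  | _, [], mm, cdr => (mm, cdr)
  | j, m :: rest, mm, cdr =>
      if m ≠ "0" then
        loopB marks (j+1) rest (mm.set j ((PySem.Int.ofStr? m).getD 0)) (cdr ++ [j])
      else loopB marks (j+1) rest mm cdr

-- the body of the inner 'for i in (j - fr_len, j + fr_len)' loop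
def setZero (marks : List String) (mm : List Int) (i : Int) : List Int :=
  if 0 ≤ i ∧ i < (marks.length : Int) ∧ PySem.List.pyGetD marks i "" = "0" then mm.set i.toNat 0
  else mm

def get_model_id_mask_py_alt (ids : List String) (marks : List String) (fr_len : Int) : List String × List Int :=
  let p := loopB marks 0 marks (marks.map fun _ => (-1 : Int)) []
  let mask := p.2.foldl
    (fun mm (j : Nat) => setZero marks (setZero marks mm ((j : Int) - fr_len)) ((j : Int) + fr_len)) p.1
  ((ids.zip mask).filterMap (fun q => if q.2 ≥ 0 then some q.1 else none),
   mask.filter (fun m => decide (m ≥ 0)))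

-- ===== PRECONDITION & SPEC =====
-- Pre_ excludes: len(ids) > len(marks) (A raises IndexError building model_block_id), CDR marks
-- that int() cannot parse (A raises ValueError), and negative fr_len when marks contain '0' —
-- a negative window length is outside the natural domain, and there A either raises IndexError
-- or silently consults a negative-index wraparound neighbour.
def Pre_get_model_id_mask_py (ids : List String) (marks : List String) (fr_len : Int) : Prop :=
  ids.length ≤ marks.length ∧
  (∀ m ∈ marks, m ≠ "0" → (PySem.Int.ofStr? m).isSome) ∧
  (0 ≤ fr_len ∨ "0" ∉ marks)
instance (ids : List String) (marks : List String) (fr_len : Int) : Decidable (Pre_get_model_id_mask_py ids marks fr_len) := by unfold Pre_get_model_id_mask_py; infer_instance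

def pvWitness_get_model_id_mask_py : List String × List String × Int := (["a", "b", "c"], ["0", "1", "0"], 1)

def Spec_get_model_id_mask_py (ids : List String) (marks : List String) (fr_len : Int) (out : List String × List Int) : Prop := out = get_model_id_mask_py_alt ids marks fr_len
instance (ids : List String) (marks : List String) (fr_len : Int) (out : List String × List Int) : Decidable (Spec_get_model_id_mask_py ids marks fr_len out) := by unfold Spec_get_model_id_mask_py; infer_instance

-- ===== CLAIM (what is proved, stated in full; the proofs are below) =====
def Claim_equal_get_model_id_mask_py : Prop := ∀ (ids : List String) (marks : List String) (fr_len : Int), Dom_get_model_id_mask_py ids marks fr_len → Pre_get_model_id_mask_py ids marks fr_len → Spec_get_model_id_mask_py ids marks fr_len (get_model_id_mask_py ids marks fr_len)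

-- ===== LEMMAS AND PROOFS =====

-- the value A's loop leaves at index i
def aval (marks : List String) (fr_len : Int) (i : Nat) : Int :=
  if marks.getD i "" ≠ "0" then (PySem.Int.ofStr? (marks.getD i "")).getD 0
  else if ((i : Int) + fr_len < (marks.length : Int)) ∧
          PySem.List.pyGetD marks ((i : Int) + fr_len) "" ≠ "0" then
    (PySem.Int.ofStr? (marks.getD i "")).getD 0
  else if (0 ≤ (i : Int) - fr_len) ∧
          PySem.List.pyGetD marks ((i : Int) - fr_len) "" ≠ "0" then
    (PySem.Int.ofStr? (marks.getD i "")).getD 0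
  else -1

lemma stepA_length (marks : List String) (fr_len : Int) (i : Nat) (m : String) (mm : List Int) :
    (stepA marks fr_len i m mm).length = mm.length := by
  unfold stepA
  split_ifs <;> simp [List.length_set]

lemma stepA_getElem?_ne (marks : List String) (fr_len : Int) (i : Nat) (m : String)
    (mm : List Int) (j : Nat) (hne : i ≠ j) :
    (stepA marks fr_len i m mm)[j]? = mm[j]? := by
  unfold stepA
  split_ifs <;> first | rfl | rw [List.getElem?_set_ne hne]

lemma stepA_getElem?_self (marks : List String) (fr_len : Int) (i : Nat) (m : String)
    (mm : List Int) (hi : i < marks.length) (hlen : mm.length = marks.length)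
    (hm : marks.getD i "" = m) (hmm : mm[i]? = some (-1)) :
    (stepA marks fr_len i m mm)[i]? = some (aval marks fr_len i) := by
  unfold stepA aval
  rw [hm]
  split_ifs <;> first | rw [List.getElem?_set_self (by omega)] | exact hmm

lemma loopA_getElem? (marks : List String) (fr_len : Int) :
    ∀ (rest : List String) (i : Nat) (mm : List Int),
      rest = marks.drop i → mm.length = marks.length →
      (∀ j, i ≤ j → j < marks.length → mm[j]? = some (-1)) →
      ∀ j, (loopA marks fr_len i rest mm)[j]? =
        if i ≤ j ∧ j < marks.length then some (aval marks fr_len j) else mm[j]? := by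
  intro rest
  induction rest with
  | nil =>
      intro i mm hdrop _hlen _hsuf j
      have hle : marks.length ≤ i := List.drop_eq_nil_iff.mp hdrop.symm
      rw [if_neg (by omega)]
      rfl
  | cons m rest ih =>
      intro i mm hdrop hlen hsuf j
      have hi : i < marks.length := by
        by_contra hc
        rw [List.drop_eq_nil_of_le (by omega)] at hdrop
        exact List.cons_ne_nil m rest hdrop
      have hmi : marks[i]? = some m := by
        have h0 : (marks.drop i)[0]? = marks[i + 0]? := List.getElem?_drop
        rw [← hdrop] at h0
        simpa using h0.symm
      have hgd : marks.getD i "" = m := by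
        rw [List.getD_eq_getElem?_getD, hmi]; rfl
      have hrest : rest = marks.drop (i+1) := by
        have h1 : (m :: rest).drop 1 = (marks.drop i).drop 1 := by rw [hdrop]
        simpa [List.drop_drop, Nat.add_comm] using h1
      simp only [loopA]
      rw [ih (i+1) (stepA marks fr_len i m mm) hrest
        (by rw [stepA_length]; exact hlen)
        (fun k hk1 hk2 => by
          rw [stepA_getElem?_ne marks fr_len i m mm k (by omega)]
          exact hsuf k (by omega) hk2) j]
      split_ifs with h1 h2 h2
      · rfl
      · omega
      · have hj : j = i := by omega
        subst hj
        exact stepA_getElem?_self marks fr_len j m mm hi hlen hgd (hsuf j h2.1 h2.2)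
      · exact stepA_getElem?_ne marks fr_len i m mm j (by omega)

lemma loopA_length (marks : List String) (fr_len : Int) :
    ∀ (rest : List String) (i : Nat) (mm : List Int),
      (loopA marks fr_len i rest mm).length = mm.length := by
  intro rest
  induction rest with
  | nil => intro i mm; simp [loopA]
  | cons m rest ih =>
      intro i mm
      simp only [loopA]
      rw [ih, stepA_length]

lemma loopB_fst_getElem? (marks : List String) :
    ∀ (rest : List String) (i : Nat) (mm : List Int) (cdr : List Nat),
      rest = marks.drop i → mm.length = marks.length →
      ∀ j, ((loopB marks i rest mm cdr).1)[j]? =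
        if i ≤ j ∧ j < marks.length ∧ marks.getD j "" ≠ "0" then
          some ((PySem.Int.ofStr? (marks.getD j "")).getD 0)
        else mm[j]? := by
  intro rest
  induction rest with
  | nil =>
      intro i mm cdr hdrop _hlen j
      have hle : marks.length ≤ i := List.drop_eq_nil_iff.mp hdrop.symm
      rw [if_neg (by omega)]
      rfl
  | cons m rest ih =>
      intro i mm cdr hdrop hlen j
      have hi : i < marks.length := by
        by_contra hc
        rw [List.drop_eq_nil_of_le (by omega)] at hdrop
        exact List.cons_ne_nil m rest hdrop
      have hmi : marks[i]? = some m := by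
        have h0 : (marks.drop i)[0]? = marks[i + 0]? := List.getElem?_drop
        rw [← hdrop] at h0
        simpa using h0.symm
      have hgd : marks.getD i "" = m := by
        rw [List.getD_eq_getElem?_getD, hmi]; rfl
      have hrest : rest = marks.drop (i+1) := by
        have h1 : (m :: rest).drop 1 = (marks.drop i).drop 1 := by rw [hdrop]
        simpa [List.drop_drop, Nat.add_comm] using h1
      simp only [loopB]
      by_cases hm : m ≠ "0"
      · rw [if_pos hm]
        rw [ih (i+1) _ _ hrest (by simpa [List.length_set] using hlen) j]
        split_ifs with h1 h2 h2
        · rfl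
        · exact absurd ⟨by omega, h1.2.1, h1.2.2⟩ h2
        · rcases h2 with ⟨hij, hjn, hne⟩
          have hj : j = i := by
            by_contra hji
            exact h1 ⟨by omega, hjn, hne⟩
          subst hj
          rw [List.getElem?_set_self (by omega), hgd]
        · by_cases hj : j = i
          · subst hj
            exact absurd ⟨le_rfl, hi, hgd ▸ hm⟩ h2
          · rw [List.getElem?_set_ne (Ne.symm hj)]
      · rw [if_neg hm]
        rw [ih (i+1) _ _ hrest hlen j]
        split_ifs with h1 h2 h2
        · rfl
        · exact absurd ⟨by omega, h1.2.1, h1.2.2⟩ h2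
        · exfalso
          rcases h2 with ⟨hij, hjn, hne⟩
          have hj : j = i := by
            by_contra hji
            exact h1 ⟨by omega, hjn, hne⟩
          subst hj
          rw [hgd] at hne
          exact hne (by simpa using hm)
        · rfl

lemma loopB_fst_length (marks : List String) :
    ∀ (rest : List String) (i : Nat) (mm : List Int) (cdr : List Nat),
      ((loopB marks i rest mm cdr).1).length = mm.length := by
  intro rest
  induction rest with
  | nil => intro i mm cdr; simp [loopB]
  | cons m rest ih =>
      intro i mm cdr
      simp only [loopB]
      split_ifs <;> simp [ih, List.length_set]

lemma loopB_snd_mem (marks : List String) :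
    ∀ (rest : List String) (i : Nat) (mm : List Int) (cdr : List Nat),
      rest = marks.drop i →
      ∀ j, (j ∈ (loopB marks i rest mm cdr).2 ↔
        j ∈ cdr ∨ (i ≤ j ∧ j < marks.length ∧ marks.getD j "" ≠ "0")) := by
  intro rest
  induction rest with
  | nil =>
      intro i mm cdr hdrop j
      have hle : marks.length ≤ i := List.drop_eq_nil_iff.mp hdrop.symm
      simp only [loopB]
      constructor
      · exact fun h => Or.inl h
      · rintro (h | ⟨h1, h2, _⟩)
        · exact h
        · omega
  | cons m rest ih =>
      intro i mm cdr hdrop j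
      have hi : i < marks.length := by
        by_contra hc
        rw [List.drop_eq_nil_of_le (by omega)] at hdrop
        exact List.cons_ne_nil m rest hdrop
      have hmi : marks[i]? = some m := by
        have h0 : (marks.drop i)[0]? = marks[i + 0]? := List.getElem?_drop
        rw [← hdrop] at h0
        simpa using h0.symm
      have hgd : marks.getD i "" = m := by
        rw [List.getD_eq_getElem?_getD, hmi]; rfl
      have hrest : rest = marks.drop (i+1) := by
        have h1 : (m :: rest).drop 1 = (marks.drop i).drop 1 := by rw [hdrop]
        simpa [List.drop_drop, Nat.add_comm] using h1
      simp only [loopB]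
      split_ifs with hm
      · rw [ih (i+1) _ _ hrest j]
        simp only [List.mem_append, List.mem_singleton]
        constructor
        · rintro ((h | rfl) | ⟨h1, h2, h3⟩)
          · exact Or.inl h
          · exact Or.inr ⟨le_rfl, hi, hgd ▸ hm⟩
          · exact Or.inr ⟨by omega, h2, h3⟩
        · rintro (h | ⟨h1, h2, h3⟩)
          · exact Or.inl (Or.inl h)
          · by_cases hj : j = i
            · exact Or.inl (Or.inr hj)
            · exact Or.inr ⟨by omega, h2, h3⟩
      · rw [ih (i+1) _ _ hrest j]
        constructor
        · rintro (h | ⟨h1, h2, h3⟩)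
          · exact Or.inl h
          · exact Or.inr ⟨by omega, h2, h3⟩
        · rintro (h | ⟨h1, h2, h3⟩)
          · exact Or.inl h
          · refine Or.inr ⟨?_, h2, h3⟩
            rcases Nat.lt_or_ge i j with h | h
            · omega
            · exfalso
              have hj : j = i := by omega
              subst hj
              rw [hgd] at h3
              exact h3 (by simpa using hm)

lemma setZero_getElem? (marks : List String) (mm : List Int) (i : Int)
    (hlen : mm.length = marks.length) (t : Nat) :
    (setZero marks mm i)[t]? =
      if (t : Int) = i ∧ t < marks.length ∧ marks.getD t "" = "0" then some 0 else mm[t]? := by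
  unfold setZero
  split_ifs with h1 h2 h2
  · -- written, and t is the target
    obtain ⟨hti, htn, _⟩ := h2
    have : i.toNat = t := by omega
    rw [this, List.getElem?_set_self (by omega)]
  · -- written, t is not the target
    rcases h1 with ⟨hi0, hin, hm⟩
    by_cases hne : i.toNat = t
    · exfalso
      apply h2
      refine ⟨by omega, by omega, ?_⟩
      have : PySem.List.pyGetD marks i "" = marks.getD t "" := by
        rw [PySem.List.pyGetD_of_nonneg marks "" hi0, hne]
      rw [← this, hm]
    · rw [List.getElem?_set_ne hne]
  · -- not written but claimed target: contradiction
    exfalso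
    apply h1
    obtain ⟨hti, htn, hm⟩ := h2
    refine ⟨by omega, by omega, ?_⟩
    have : PySem.List.pyGetD marks i "" = marks.getD t "" := by
      rw [PySem.List.pyGetD_of_nonneg marks "" (by omega)]
      congr 1
      omega
    rw [this, hm]
  · rfl

lemma setZero_length (marks : List String) (mm : List Int) (i : Int) :
    (setZero marks mm i).length = mm.length := by
  unfold setZero
  split_ifs <;> simp [List.length_set]

lemma foldl_scatter_getElem? (marks : List String) (fr_len : Int) :
    ∀ (cs : List Nat) (mm : List Int), mm.length = marks.length →
      ∀ t : Nat,
        (cs.foldl (fun mm (j : Nat) =>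
          setZero marks (setZero marks mm ((j : Int) - fr_len)) ((j : Int) + fr_len)) mm)[t]? =
        if (∃ j ∈ cs, ((t : Int) = (j : Int) - fr_len ∨ (t : Int) = (j : Int) + fr_len)) ∧
            t < marks.length ∧ marks.getD t "" = "0"
        then some 0 else mm[t]? := by
  intro cs
  induction cs with
  | nil =>
      intro mm _hlen t
      rw [List.foldl_nil, if_neg]
      rintro ⟨⟨j, hj, -⟩, -, -⟩
      exact absurd hj (List.not_mem_nil)
  | cons c cs ih =>
      intro mm hlen t
      simp only [List.foldl_cons]
      rw [ih _ (by rw [setZero_length, setZero_length]; exact hlen) t]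
      rw [setZero_getElem? _ _ _ (by rw [setZero_length]; exact hlen) t]
      rw [setZero_getElem? _ _ _ hlen t]
      by_cases htn : t < marks.length ∧ marks.getD t "" = "0"
      · obtain ⟨htn, h0⟩ := htn
        by_cases hex : ∃ j ∈ cs, ((t : Int) = (j : Int) - fr_len ∨ (t : Int) = (j : Int) + fr_len)
        · obtain ⟨j, hj, hjt⟩ := hex
          rw [if_pos ⟨⟨j, hj, hjt⟩, htn, h0⟩,
              if_pos ⟨⟨j, List.mem_cons_of_mem c hj, hjt⟩, htn, h0⟩]
        · rw [if_neg (fun hc => hex hc.1)]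
          by_cases ht2 : (t : Int) = (c : Int) + fr_len
          · rw [if_pos ⟨ht2, htn, h0⟩, if_pos ⟨⟨c, List.mem_cons_self, Or.inr ht2⟩, htn, h0⟩]
          · rw [if_neg (fun hc => ht2 hc.1)]
            by_cases ht1 : (t : Int) = (c : Int) - fr_len
            · rw [if_pos ⟨ht1, htn, h0⟩, if_pos ⟨⟨c, List.mem_cons_self, Or.inl ht1⟩, htn, h0⟩]
            · rw [if_neg (fun hc => ht1 hc.1), if_neg]
              rintro ⟨⟨j, hj, hjt⟩, -, -⟩
              rcases List.mem_cons.mp hj with rfl | hj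
              · rcases hjt with h | h
                · exact ht1 h
                · exact ht2 h
              · exact hex ⟨j, hj, hjt⟩
      · rw [if_neg (fun hc => htn ⟨hc.2.1, hc.2.2⟩), if_neg (fun hc => htn ⟨hc.2.1, hc.2.2⟩),
            if_neg (fun hc => htn ⟨hc.2.1, hc.2.2⟩), if_neg (fun hc => htn ⟨hc.2.1, hc.2.2⟩)]

-- the two mask arrays coincide
lemma mask_eq (marks : List String) (fr_len : Int)
    (hfr : 0 ≤ fr_len ∨ "0" ∉ marks) :
    loopA marks fr_len 0 marks (marks.map fun _ => (-1 : Int)) =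
    ((loopB marks 0 marks (marks.map fun _ => (-1 : Int)) []).2).foldl
      (fun mm (j : Nat) => setZero marks (setZero marks mm ((j : Int) - fr_len)) ((j : Int) + fr_len))
      ((loopB marks 0 marks (marks.map fun _ => (-1 : Int)) []).1) := by
  have hinit : ∀ j, j < marks.length → ((marks.map fun _ => (-1 : Int)))[j]? = some (-1) := by
    intro j hj
    rw [List.getElem?_map, List.getElem?_eq_getElem hj]
    rfl
  apply List.ext_getElem?
  intro t
  rw [loopA_getElem? marks fr_len marks 0 _ rfl (by simp) (fun j _ hj => hinit j hj) t]
  rw [foldl_scatter_getElem? marks fr_len _ _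
    (by rw [loopB_fst_length]; simp) t]
  rw [loopB_fst_getElem? marks marks 0 _ [] rfl (by simp) t]
  have hcdr : ∀ j : Nat, (j ∈ (loopB marks 0 marks (marks.map fun _ => (-1 : Int)) []).2 ↔
      j < marks.length ∧ marks.getD j "" ≠ "0") := by
    intro j
    have := loopB_snd_mem marks marks 0 (marks.map fun _ => (-1 : Int)) [] rfl j
    simpa using this
  by_cases htn : t < marks.length
  · by_cases h0 : marks.getD t "" = "0"
    · -- '0' position: A probes both neighbours, B may have scattered a 0 here
      have hfr' : 0 ≤ fr_len := by
        rcases hfr with h | h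
        · exact h
        · exfalso
          apply h
          have : marks[t] = "0" := by rw [← List.getD_eq_getElem marks "" htn, h0]
          exact this ▸ List.getElem_mem htn
      rw [if_pos ⟨Nat.zero_le t, htn⟩]
      rw [if_neg (show ¬(0 ≤ t ∧ t < marks.length ∧ marks.getD t "" ≠ "0") from
        fun hc => hc.2.2 h0)]
      have hiff : (∃ j ∈ (loopB marks 0 marks (marks.map fun _ => (-1 : Int)) []).2,
            ((t : Int) = (j : Int) - fr_len ∨ (t : Int) = (j : Int) + fr_len)) ↔
          (((t : Int) + fr_len < (marks.length : Int)) ∧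
            PySem.List.pyGetD marks ((t : Int) + fr_len) "" ≠ "0") ∨
          ((0 ≤ (t : Int) - fr_len) ∧
            PySem.List.pyGetD marks ((t : Int) - fr_len) "" ≠ "0") := by
        constructor
        · rintro ⟨j, hj, hjt | hjt⟩
          · obtain ⟨hjn, hjne⟩ := (hcdr j).mp hj
            left
            constructor
            · omega
            · rw [PySem.List.pyGetD_of_nonneg marks "" (by omega)]
              have : ((t : Int) + fr_len).toNat = j := by omega
              rw [this]
              exact hjne
          · obtain ⟨hjn, hjne⟩ := (hcdr j).mp hj
            right
            constructor
            · omega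
            · rw [PySem.List.pyGetD_of_nonneg marks "" (by omega)]
              have : ((t : Int) - fr_len).toNat = j := by omega
              rw [this]
              exact hjne
        · rintro (⟨hb, hne⟩ | ⟨hb, hne⟩)
          · refine ⟨((t : Int) + fr_len).toNat, (hcdr _).mpr ⟨by omega, ?_⟩, Or.inl (by omega)⟩
            rw [PySem.List.pyGetD_of_nonneg marks "" (by omega)] at hne
            exact hne
          · refine ⟨((t : Int) - fr_len).toNat, (hcdr _).mpr ⟨by omega, ?_⟩, Or.inr (by omega)⟩
            rw [PySem.List.pyGetD_of_nonneg marks "" (by omega)] at hne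
            exact hne
      unfold aval
      rw [if_neg (fun hc => hc h0), h0]
      by_cases hc1 : ((t : Int) + fr_len < (marks.length : Int)) ∧
          PySem.List.pyGetD marks ((t : Int) + fr_len) "" ≠ "0"
      · rw [if_pos hc1, if_pos ⟨hiff.mpr (Or.inl hc1), htn, rfl⟩]
        decide
      · rw [if_neg hc1]
        by_cases hc2 : (0 ≤ (t : Int) - fr_len) ∧
            PySem.List.pyGetD marks ((t : Int) - fr_len) "" ≠ "0"
        · rw [if_pos hc2, if_pos ⟨hiff.mpr (Or.inr hc2), htn, rfl⟩]
          decide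
        · rw [if_neg hc2, if_neg (by
            rintro ⟨hex, -, -⟩
            rcases hiff.mp hex with h | h
            · exact hc1 h
            · exact hc2 h)]
          exact (hinit t htn).symm
    · -- CDR position: both keep int(mark)
      rw [if_pos ⟨Nat.zero_le t, htn⟩]
      rw [if_neg (show ¬((∃ j ∈ (loopB marks 0 marks (marks.map fun _ => (-1 : Int)) []).2,
            ((t : Int) = (j : Int) - fr_len ∨ (t : Int) = (j : Int) + fr_len)) ∧
            t < marks.length ∧ marks.getD t "" = "0") from fun hc => h0 hc.2.2)]
      rw [if_pos ⟨Nat.zero_le t, htn, h0⟩]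
      unfold aval
      rw [if_pos h0]
  · -- beyond the mask: both sides untouched
    rw [if_neg (by omega), if_neg (fun hc => htn hc.2.1), if_neg (by
      rintro ⟨-, hn, -⟩
      exact htn hn)]

lemma blockA_eq (mask : List Int) :
    ∀ (ids : List String) (i : Nat), i + ids.length ≤ mask.length →
      blockA mask i ids =
        ((ids.zip (mask.drop i)).filterMap (fun q => if q.2 ≥ 0 then some q.1 else none)) := by
  intro ids
  induction ids with
  | nil =>
      intro i _h
      simp [blockA]
  | cons x rest ih =>
      intro i h
      have hi : i < mask.length := by
        simp only [List.length_cons] at h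
        omega
      have hdrop : mask.drop i = mask[i] :: mask.drop (i+1) := List.drop_eq_getElem_cons hi
      have hget : PySem.List.pyGetD mask ((i : Nat) : Int) (-1) = mask[i] := by
        rw [PySem.List.pyGetD_of_nonneg mask (-1) (by omega)]
        simp [List.getD_eq_getElem?_getD, List.getElem?_eq_getElem hi]
      simp only [blockA, hget, hdrop, List.zip_cons_cons, List.filterMap_cons]
      have hrec := ih (i+1) (by simp only [List.length_cons] at h; omega)
      split_ifs with hc
      · simp only [hrec]
      · simp only [hrec]

-- ===== VERDICT (by name: the statement is the Claim_ definition above) =====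
theorem get_model_id_mask_py_spec : Claim_equal_get_model_id_mask_py := by
  intro ids marks fr_len _hdom hpre
  obtain ⟨hlen, _hpar, hfr⟩ := hpre
  unfold Spec_get_model_id_mask_py get_model_id_mask_py get_model_id_mask_py_alt
  dsimp only
  rw [← mask_eq marks fr_len hfr]
  refine Prod.ext ?_ rfl
  have hl : ids.length ≤ (loopA marks fr_len 0 marks (marks.map fun _ => (-1 : Int))).length := by
    rw [loopA_length, List.length_map]; exact hlen
  simpa using blockA_eq _ ids 0 (by simpa using hl)
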